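-- pv_equiv track=rewrite | github.com/arrmani88/Lem-in | visualizer/data_parse.py | room_or_link
-- ===== SOURCE A (Python) =====
-- def     room_or_link(line):
-- 	if line[0] == 'L':
-- 		return 'A'
-- 	for c in line:
-- 		if c == ' ':
-- 			return 'r'
-- 		elif c == '-':
-- 			return 'l'
-- ===== SOURCE B (Python) =====
-- def room_or_link(line):
--     if line[0] == 'L':
--         return 'A'
--     s = line.find(' ')
--     d = line.find('-')
--     if s != -1 and (d == -1 or s < d):
--         return 'r'
--     if d != -1:
--         return 'l'
--     return None
-- ===== Notes on version B (the rewrite author's own statement) =====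
-- stated objective: idiomatic
-- what changed: Replaces the early-exit per-character scan with two str.find position lookups and a comparison of the first-occurrence indices of the space and the dash. (the scan moves from a Python-level loop into C-level str.find).
import Mathlib
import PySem

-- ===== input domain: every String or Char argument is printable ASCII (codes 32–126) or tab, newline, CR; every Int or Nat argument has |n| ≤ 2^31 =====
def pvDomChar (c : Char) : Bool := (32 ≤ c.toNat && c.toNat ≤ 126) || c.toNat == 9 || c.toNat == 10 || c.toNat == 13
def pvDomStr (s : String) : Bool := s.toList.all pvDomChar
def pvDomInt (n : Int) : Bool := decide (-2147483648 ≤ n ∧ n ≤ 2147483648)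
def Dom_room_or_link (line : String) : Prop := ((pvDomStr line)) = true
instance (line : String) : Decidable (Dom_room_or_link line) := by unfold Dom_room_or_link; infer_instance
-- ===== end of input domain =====

-- B classifies the line by comparing the first-occurrence indices from str.find
-- instead of A's early-exit character scan (idiomatic; same O(n) cost).


-- ===== PORT A =====
-- the `for c in line` loop with its early returns (falls through to None)
def pvScanA : List Char → Option String
  | [] => none
  | c :: t => if c = ' ' then some "r" else if c = '-' then some "l" else pvScanA t

def room_or_link (line : String) : Option String :=
  match PySem.Str.pyGet? line 0 with
  | none => none   -- Python raises IndexError here; excluded by Pre_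
  | some c => if c = 'L' then some "A" else pvScanA line.toList

-- ===== PORT B =====
def room_or_link_alt (line : String) : Option String :=
  match PySem.Str.pyGet? line 0 with
  | none => none   -- Source B raises IndexError here too; excluded by Pre_
  | some c =>
    if c = 'L' then some "A"
    else
      let s := PySem.Str.find line " "
      let d := PySem.Str.find line "-"
      if s ≠ -1 ∧ (d = -1 ∨ s < d) then some "r"
      else if d ≠ -1 then some "l"
      else none

-- ===== PRECONDITION & SPEC =====
-- Pre_ excludes only the empty line, on which both Pythons raise IndexError at line[0].
def Pre_room_or_link (line : String) : Prop := line ≠ ""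
instance (line : String) : Decidable (Pre_room_or_link line) := by unfold Pre_room_or_link; infer_instance
def pvWitness_room_or_link : String := "a b"

def Spec_room_or_link (line : String) (out : Option String) : Prop := out = room_or_link_alt line
instance (line : String) (out : Option String) : Decidable (Spec_room_or_link line out) := by unfold Spec_room_or_link; infer_instance

-- ===== CLAIM (what is proved, stated in full; the proofs are below) =====
def Claim_equal_room_or_link : Prop := ∀ (line : String), Dom_room_or_link line → Pre_room_or_link line → Spec_room_or_link line (room_or_link line)

-- ===== LEMMAS AND PROOFS =====

-- find.go never returns a hit below its starting index
lemma pv_go_lb (sub t : List Char) (k : Nat) :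
    PySem.Chars.find.go sub t k = -1 ∨ (k : Int) ≤ PySem.Chars.find.go sub t k := by
  induction t generalizing k with
  | nil =>
    simp only [PySem.Chars.find.go]
    split_ifs
    · right; omega
    · left; rfl
  | cons c t ih =>
    simp only [PySem.Chars.find.go]
    split_ifs with h
    · right; omega
    · rcases ih (k + 1) with h' | h'
      · exact Or.inl h'
      · right; omega

-- the scan returns exactly what the comparison of first-occurrence indices says
lemma pv_scan_eq (cs : List Char) (k : Nat) :
    pvScanA cs =
      (let s := PySem.Chars.find.go [' '] cs k
       let d := PySem.Chars.find.go ['-'] cs k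
       if s ≠ -1 ∧ (d = -1 ∨ s < d) then some "r"
       else if d ≠ -1 then some "l"
       else none) := by
  induction cs generalizing k with
  | nil => simp [pvScanA, PySem.Chars.find.go]
  | cons c t ih =>
    by_cases hsp : c = ' '
    · subst hsp
      have hp1 : List.isPrefixOf [' '] (' ' :: t) = true := by simp [List.isPrefixOf]
      have hp2 : List.isPrefixOf ['-'] (' ' :: t) = false := by simp [List.isPrefixOf]
      simp only [pvScanA, PySem.Chars.find.go, hp1, hp2, if_true, Bool.false_eq_true, if_false]
      rcases pv_go_lb ['-'] t (k + 1) with hd | hd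
      · rw [if_pos ⟨by omega, Or.inl hd⟩]
      · rw [if_pos ⟨by omega, Or.inr (by push_cast at hd ⊢; omega)⟩]
    · by_cases hdh : c = '-'
      · subst hdh
        have hp1 : List.isPrefixOf [' '] ('-' :: t) = false := by simp [List.isPrefixOf]
        have hp2 : List.isPrefixOf ['-'] ('-' :: t) = true := by simp [List.isPrefixOf]
        have hne : ¬ ('-' : Char) = ' ' := by decide
        simp only [pvScanA, PySem.Chars.find.go, hp1, hp2, if_true, if_neg hne, Bool.false_eq_true, if_false]
        have hfirst : ¬ (PySem.Chars.find.go [' '] t (k + 1) ≠ -1 ∧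
            ((k : Int) = -1 ∨ PySem.Chars.find.go [' '] t (k + 1) < (k : Int))) := by
          rcases pv_go_lb [' '] t (k + 1) with hs | hs
          · rintro ⟨h1, _⟩; exact h1 hs
          · rintro ⟨_, h2 | h2⟩
            · omega
            · push_cast at hs; omega
        rw [if_neg hfirst, if_pos (by omega : ((k : Int) ≠ -1))]
      · have hp1 : List.isPrefixOf [' '] (c :: t) = false := by
          simp [List.isPrefixOf, Ne.symm hsp]
        have hp2 : List.isPrefixOf ['-'] (c :: t) = false := by
          simp [List.isPrefixOf, Ne.symm hdh]
        simp only [pvScanA, PySem.Chars.find.go, hp1, hp2, if_neg hsp, if_neg hdh, Bool.false_eq_true, if_false]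
        exact ih (k + 1)

-- ===== VERDICT (by name: the statement is the Claim_ definition above) =====
theorem room_or_link_spec : Claim_equal_room_or_link := by
  intro line _ _
  unfold Spec_room_or_link room_or_link room_or_link_alt
  cases h : PySem.Str.pyGet? line 0 with
  | none => rfl
  | some c =>
    by_cases hL : c = 'L'
    · simp [hL]
    · simp only [hL, if_false]
      rw [pv_scan_eq line.toList 0]; rfl
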